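-- pv_equiv track=rewrite | github.com/jayam04/sturdy-memory | coding-competitions/leetcode/6431.py | doesValidArrayExist
-- ===== SOURCE A (Python) =====
-- from typing import List
--
-- def doesValidArrayExist(derived: List[int]) -> bool:
--     n = len(derived)
--     if n == 1:
--         return not derived[0]
--     arr = [0 for i in range(n)]
--     for i in range(n - 1):
--         if derived[i]:
--             arr[i + 1] = (arr[i] + 1) % 2
--         else:
--             arr[i + 1] = arr[i]
--     if derived[-1]:
--         if arr[0] == arr[-1]:
--             return False
--         return True
--     else:
--         if arr[0] == arr[-1]:
--             return True
--         return False
-- ===== SOURCE B (Python) =====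
-- def doesValidArrayExist(derived):
--     # B: closed form — a valid original exists iff the XOR (parity of nonzero
--     # entries) of the whole derived list is 0.
--     return sum(1 for x in derived if x) % 2 == 0
-- ===== Notes on version B (the rewrite author's own statement) =====
-- stated objective: simpler
-- what changed: Replaces the O(n)-space array-building simulation with the closed-form XOR invariant: count the nonzero entries in one pass and return whether that parity is 0.
import Mathlib
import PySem

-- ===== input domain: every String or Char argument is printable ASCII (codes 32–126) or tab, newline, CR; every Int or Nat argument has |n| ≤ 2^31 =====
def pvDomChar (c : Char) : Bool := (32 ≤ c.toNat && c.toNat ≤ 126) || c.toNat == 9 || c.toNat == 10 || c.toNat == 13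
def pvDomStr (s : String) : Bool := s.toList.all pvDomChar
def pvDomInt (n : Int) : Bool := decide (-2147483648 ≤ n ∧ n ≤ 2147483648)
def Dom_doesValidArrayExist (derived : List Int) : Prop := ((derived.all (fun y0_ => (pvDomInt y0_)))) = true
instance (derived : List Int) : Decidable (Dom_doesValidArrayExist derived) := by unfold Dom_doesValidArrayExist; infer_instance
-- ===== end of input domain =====

-- B replaces A's array-building simulation by the closed-form parity invariant; proved equal on all nonempty lists (on the empty list A raises IndexError).

-- ===== PORT A =====
-- one step of A's loop body: arr[i+1] := (arr[i]+1) % 2 if derived[i] else arr[i]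
def pvStepA (derived : List Int) (arr : List Int) (i : Nat) : List Int :=
  if ((PySem.List.pyGet? derived (i : Int)).getD 0) ≠ 0 then
    arr.set (i + 1) (PySem.Int.mod (arr.getD i 0 + 1) 2)
  else
    arr.set (i + 1) (arr.getD i 0)

def doesValidArrayExist (derived : List Int) : Bool :=
  let n := derived.length
  if n = 1 then
    decide ((PySem.List.pyGet? derived 0).getD 0 = 0)
  else
    let arr := (List.range (n - 1)).foldl (pvStepA derived) (List.replicate n 0)
    if ((PySem.List.pyGet? derived (-1)).getD 0) ≠ 0 then
      if arr.getD 0 0 = arr.getD (n - 1) 0 then false else true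
    else
      if arr.getD 0 0 = arr.getD (n - 1) 0 then true else false

-- ===== PORT B =====
def doesValidArrayExist_alt (derived : List Int) : Bool :=
  decide (PySem.Int.mod (derived.foldl (fun acc x => acc + (if x ≠ 0 then 1 else 0)) 0) 2 = 0)

-- ===== PRECONDITION & SPEC =====
-- Pre_ excludes exactly the empty list, on which A raises IndexError when reading the last element.
def Pre_doesValidArrayExist (derived : List Int) : Prop := derived ≠ []
instance (derived : List Int) : Decidable (Pre_doesValidArrayExist derived) := by unfold Pre_doesValidArrayExist; infer_instance
def pvWitness_doesValidArrayExist : List Int := [1, 0, 1]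

def Spec_doesValidArrayExist (derived : List Int) (out : Bool) : Prop := out = doesValidArrayExist_alt derived
instance (derived : List Int) (out : Bool) : Decidable (Spec_doesValidArrayExist derived out) := by unfold Spec_doesValidArrayExist; infer_instance

-- ===== CLAIM =====
def Claim_equal_doesValidArrayExist : Prop := ∀ (derived : List Int), Dom_doesValidArrayExist derived → Pre_doesValidArrayExist derived → Spec_doesValidArrayExist derived (doesValidArrayExist derived)

-- ===== LEMMAS AND PROOFS =====

-- number of nonzero entries
def pvCnt (xs : List Int) : Nat := xs.countP (fun x => decide (x ≠ 0))

theorem pvFoldl_cnt (xs : List Int) (a : Int) :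
    xs.foldl (fun acc x => acc + (if x ≠ 0 then 1 else 0)) a = a + (pvCnt xs : Int) := by
  induction xs generalizing a with
  | nil => simp [pvCnt]
  | cons x xs ih =>
    simp only [List.foldl_cons, ih, pvCnt, List.countP_cons]
    by_cases hx : x = 0 <;> simp [hx] <;> push_cast <;> ring

theorem pvCnt_take_succ (xs : List Int) (k : Nat) (h : k < xs.length) :
    pvCnt (xs.take (k + 1)) = pvCnt (xs.take k) + (if xs[k] ≠ 0 then 1 else 0) := by
  rw [pvCnt, pvCnt, List.take_add_one, List.countP_append]
  simp [h, List.countP_cons]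

-- loop invariant for A's array fill
theorem pvArr_inv (derived : List Int) (k : Nat) (hk : k < derived.length) :
    ((List.range k).foldl (pvStepA derived) (List.replicate derived.length 0)).length = derived.length ∧
    ((List.range k).foldl (pvStepA derived) (List.replicate derived.length 0)).getD 0 0 = 0 ∧
    ((List.range k).foldl (pvStepA derived) (List.replicate derived.length 0)).getD k 0
      = ((pvCnt (derived.take k) : Int)) % 2 := by
  have hmod : ∀ a : Int, PySem.Int.mod a 2 = a % 2 := fun a => PySem.Int.mod_eq_emod_of_pos (by omega)
  induction k with
  | zero => simp [pvCnt]
  | succ k ih =>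
    have hk' : k < derived.length := Nat.lt_of_succ_lt hk
    obtain ⟨hlen, h0, hval⟩ := ih hk'
    rw [List.range_succ, List.foldl_append, List.foldl_cons, List.foldl_nil]
    set arr := (List.range k).foldl (pvStepA derived) (List.replicate derived.length 0) with harr
    have hget : (PySem.List.pyGet? derived (k : Int)).getD 0 = derived[k] := by
      rw [PySem.List.pyGet?_natCast]
      simp [hk']
    have hlt : k + 1 < arr.length := by omega
    have hset_len : ∀ v : Int, (arr.set (k+1) v).length = derived.length := by
      intro v; simp [hlen]
    have hset_get : ∀ v : Int, (arr.set (k+1) v).getD (k+1) 0 = v := by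
      intro v
      rw [List.getD, List.getElem?_set_eq_of_lt _ hlt]
      rfl
    have hset_get0 : ∀ v : Int, (arr.set (k+1) v).getD 0 0 = arr.getD 0 0 := by
      intro v
      simp [List.getD, List.getElem?_set_ne (by omega : k+1 ≠ 0)]
    have hcnt := pvCnt_take_succ derived k hk'
    by_cases hd : derived[k] = 0
    · have hstep : pvStepA derived arr k = arr.set (k+1) (arr.getD k 0) := by
        unfold pvStepA
        rw [hget]
        simp [hd]
      rw [hstep]
      refine ⟨hset_len _, by rw [hset_get0]; exact h0, ?_⟩
      rw [hset_get, hval, hcnt]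
      simp [hd]
    · have hstep : pvStepA derived arr k = arr.set (k+1) (PySem.Int.mod (arr.getD k 0 + 1) 2) := by
        unfold pvStepA
        rw [hget]
        simp [hd]
      rw [hstep]
      refine ⟨hset_len _, by rw [hset_get0]; exact h0, ?_⟩
      rw [hset_get, hval, hcnt, hmod]
      simp only [hd, ne_eq, not_false_iff, if_true]
      push_cast
      omega

theorem pvAlt_eq (derived : List Int) :
    doesValidArrayExist_alt derived = decide (((pvCnt derived : Int)) % 2 = 0) := by
  unfold doesValidArrayExist_alt
  rw [pvFoldl_cnt, PySem.Int.mod_eq_emod_of_pos (by omega)]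
  simp

-- ===== VERDICT =====
theorem doesValidArrayExist_spec : Claim_equal_doesValidArrayExist := by
  intro derived _hdom hpre
  unfold Spec_doesValidArrayExist
  rw [pvAlt_eq]
  match derived, hpre with
  | [d], _ =>
    simp [doesValidArrayExist, pvCnt, PySem.List.pyGet?_zero_cons]
    by_cases hd : d = 0 <;> simp [hd] <;> omega
  | d :: d' :: rest, _ =>
    set xs := d :: d' :: rest with hxs
    have hn : xs.length = rest.length + 2 := by simp [hxs]
    have hne1 : ¬ xs.length = 1 := by omega
    have hklt : xs.length - 1 < xs.length := by omega
    obtain ⟨hlen, h0, hval⟩ := pvArr_inv xs (xs.length - 1) hklt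
    have hlast : (PySem.List.pyGet? xs (-1)).getD 0 = xs[xs.length - 1] := by
      rw [PySem.List.pyGet?_neg_one, List.getLast?_eq_getElem?]
      simp [hn]
    have hcnt : pvCnt xs = pvCnt (xs.take (xs.length - 1)) + (if xs[xs.length - 1] ≠ 0 then 1 else 0) := by
      have := pvCnt_take_succ xs (xs.length - 1) hklt
      rw [show xs.length - 1 + 1 = xs.length by omega, List.take_length] at this
      exact this
    unfold doesValidArrayExist
    simp only [hne1, if_false, hlast]
    set c := pvCnt (xs.take (xs.length - 1)) with hc
    rw [h0, hval, hcnt]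
    rcases Int.emod_two_eq_zero_or_one (c : Int) with hp | hp <;>
      by_cases hd : xs[xs.length - 1] = 0 <;>
        simp [hd, hp] <;> push_cast <;> omega
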